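-- pv_equiv track=rewrite | github.com/soufiane-amt/ReconRanger | domExtractor.py | extract_subdomains
-- ===== SOURCE A (Python) =====
-- def extract_subdomains(input_domain, amass_output):
--     subdomains = []
--     for line in amass_output.split('\n'):
--         if input_domain in line:
--             parts = line.split()
--             for part in parts:
--                 if part != input_domain and part.endswith(input_domain):
--                         subdomains.append(part)
--     return subdomains
-- ===== SOURCE B (Python) =====
-- def extract_subdomains(input_domain, amass_output):
--     return [p for p in amass_output.split()
--             if p != input_domain and p.endswith(input_domain)]
-- ===== Notes on version B (the rewrite author's own statement) =====
-- stated objective: simpler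
-- what changed: B tokenizes the whole text once with whitespace split() and keeps matching tokens in one flat comprehension, eliminating A's line loop, its redundant 'input_domain in line' substring scan, and the nested per-line token loop.
import Mathlib
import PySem

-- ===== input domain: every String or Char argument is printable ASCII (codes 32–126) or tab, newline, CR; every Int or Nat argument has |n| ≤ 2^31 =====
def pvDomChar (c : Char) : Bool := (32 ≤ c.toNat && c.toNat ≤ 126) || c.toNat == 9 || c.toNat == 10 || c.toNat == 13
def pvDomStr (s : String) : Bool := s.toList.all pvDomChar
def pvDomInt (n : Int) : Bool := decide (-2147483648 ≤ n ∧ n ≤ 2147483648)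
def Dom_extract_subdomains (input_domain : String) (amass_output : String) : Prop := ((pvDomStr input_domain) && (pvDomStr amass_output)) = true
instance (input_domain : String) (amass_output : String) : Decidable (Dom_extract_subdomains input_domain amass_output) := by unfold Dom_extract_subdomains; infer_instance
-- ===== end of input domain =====

-- B replaces A's line loop, its per-line 'input_domain in line' guard and the inner
-- token loop by one whitespace tokenization of the whole text plus a single filter (simpler).

-- ===== PORT A =====
def extract_subdomains (input_domain : String) (amass_output : String) : List String :=
  ((PySem.Str.split? amass_output "\n").getD []).foldl (fun subdomains line =>
    if PySem.Str.isIn input_domain line then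
      (PySem.Str.split₀ line).foldl (fun subdomains part =>
        if part != input_domain && PySem.Str.endswith part input_domain then
          subdomains ++ [part]
        else subdomains) subdomains
    else subdomains) []

-- ===== PORT B =====
def extract_subdomains_alt (input_domain : String) (amass_output : String) : List String :=
  (PySem.Str.split₀ amass_output).filter
    (fun p => p != input_domain && PySem.Str.endswith p input_domain)

-- ===== PRECONDITION & SPEC =====
def Spec_extract_subdomains (input_domain : String) (amass_output : String) (out : List String) : Prop := out = extract_subdomains_alt input_domain amass_output
instance (input_domain : String) (amass_output : String) (out : List String) : Decidable (Spec_extract_subdomains input_domain amass_output out) := by unfold Spec_extract_subdomains; infer_instance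

-- ===== CLAIM (what is proved, stated in full; the proofs are below) =====
def Claim_equal_extract_subdomains : Prop := ∀ (input_domain : String) (amass_output : String), Dom_extract_subdomains input_domain amass_output → Spec_extract_subdomains input_domain amass_output (extract_subdomains input_domain amass_output)

-- ===== LEMMAS AND PROOFS =====

-- "not whitespace": the character class split() keeps
def pvP (c : Char) : Bool := !PySem.Chars.isspace c

-- structural characterisation of Python's whitespace split()
def pvTok : List Char → List (List Char)
  | [] => []
  | c :: r =>
    if PySem.Chars.isspace c then pvTok r
    else (c :: r.takeWhile pvP) :: pvTok (r.dropWhile pvP)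
termination_by l => l.length
decreasing_by
  · simp
  · have := List.length_dropWhile_le pvP r; simp; omega

-- structural characterisation of s.split('\n')
def pvLines : List Char → List (List Char)
  | [] => [[]]
  | c :: r =>
    if c = '\n' then [] :: pvLines r
    else
      match pvLines r with
      | [] => [[c]]
      | h :: t => (c :: h) :: t

-- joins lines back with '\n'
def pvGlue : List (List Char) → List Char
  | [] => []
  | [x] => x
  | x :: y :: t => x ++ '\n' :: pvGlue (y :: t)

lemma pvLines_ne_nil (l : List Char) : pvLines l ≠ [] := by
  cases l with
  | nil => simp [pvLines]
  | cons c r =>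
    simp only [pvLines]
    split
    · simp
    · rcases h : pvLines r with _ | ⟨h', t⟩ <;> simp

lemma pv_nl_space : PySem.Chars.isspace '\n' = true := by decide

lemma pv_split0_go (s : List Char) : ∀ (cur : List Char) (acc : List (List Char)),
    PySem.Chars.split₀.go s cur acc =
      acc.reverse ++ (if cur.isEmpty then pvTok s
        else (cur.reverse ++ s.takeWhile pvP) :: pvTok (s.dropWhile pvP)) := by
  induction s with
  | nil =>
    intro cur acc
    cases cur <;> simp [PySem.Chars.split₀.go, pvTok]
  | cons c rest ih =>
    intro cur acc
    by_cases hsp : PySem.Chars.isspace c = true <;>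
      cases cur <;>
        simp [PySem.Chars.split₀.go, hsp, ih, pvTok, List.takeWhile_cons, List.dropWhile_cons, pvP]

lemma pv_split0_eq_tok (s : List Char) : PySem.Chars.split₀ s = pvTok s := by
  simpa using pv_split0_go s [] []

lemma pv_splitOn_go (fuel : Nat) : ∀ (l cur : List Char) (acc : List (List Char)),
    l.length < fuel →
    PySem.Chars.splitOn.go ['\n'] fuel l cur acc =
      acc.reverse ++ (match pvLines l with
        | [] => [cur.reverse]
        | h :: t => (cur.reverse ++ h) :: t) := by
  induction fuel with
  | zero => intro l cur acc h; omega
  | succ fuel ih =>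
    intro l cur acc h
    cases l with
    | nil => simp [PySem.Chars.splitOn.go, pvLines]
    | cons c rest =>
      by_cases hc : c = '\n'
      · subst hc
        have hpre : (['\n'] : List Char).isPrefixOf ('\n' :: rest) = true := by simp [List.isPrefixOf]
        rw [PySem.Chars.splitOn.go]
        simp only [hpre, if_true, List.length_cons, List.length_nil, List.drop_succ_cons, List.drop_zero]
        rw [ih rest [] _ (by simpa using Nat.lt_of_succ_lt_succ h)]
        rcases hr : pvLines rest with _ | ⟨h', t⟩
        · exact absurd hr (pvLines_ne_nil rest)
        · simp [pvLines, hr]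
      · have hpre : (['\n'] : List Char).isPrefixOf (c :: rest) = false := by
          simp [List.isPrefixOf, List.isPrefixOf?, hc]
          intro hh; exact absurd hh.symm hc
        rw [PySem.Chars.splitOn.go]
        simp only [hpre, Bool.false_eq_true, if_false]
        rw [ih rest (c :: cur) acc (by simpa using Nat.lt_of_succ_lt_succ h)]
        rcases hr : pvLines rest with _ | ⟨h', t⟩
        · exact absurd hr (pvLines_ne_nil rest)
        · simp [pvLines, hr, hc]

lemma pv_splitOn_eq_lines (s : List Char) : PySem.Chars.splitOn s ['\n'] = pvLines s := by
  rw [PySem.Chars.splitOn, pv_splitOn_go (s.length + 1) s [] [] (by omega)]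
  rcases hr : pvLines s with _ | ⟨h', t⟩
  · exact absurd hr (pvLines_ne_nil s)
  · simp

lemma pv_tok_append_nl_aux (n : Nat) : ∀ (a : List Char), a.length ≤ n →
    ∀ b, pvTok (a ++ '\n' :: b) = pvTok a ++ pvTok b := by
  induction n with
  | zero =>
    intro a ha b
    have : a = [] := by cases a <;> simp_all
    subst this
    simp [pvTok, pv_nl_space]
  | succ n ih =>
    intro a ha b
    cases a with
    | nil => simp [pvTok, pv_nl_space]
    | cons c r =>
      by_cases hsp : PySem.Chars.isspace c = true
      · rw [List.cons_append, pvTok, if_pos hsp, pvTok, if_pos hsp]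
        exact ih r (by simpa using ha) b
      · rw [List.cons_append, pvTok, if_neg hsp, pvTok, if_neg hsp]
        have hPnl : pvP '\n' = false := by decide
        by_cases hall : (r.takeWhile pvP).length = r.length
        · have hrall : r.takeWhile pvP = r := (List.takeWhile_prefix pvP).eq_of_length hall
          have hdw : r.dropWhile pvP = [] := by
            have h2 := congrArg List.length (List.takeWhile_append_dropWhile (p := pvP) (l := r))
            simp only [List.length_append, hall] at h2
            exact List.eq_nil_of_length_eq_zero (by omega)
          rw [List.takeWhile_append, if_pos hall, List.dropWhile_append, hdw]
          simp [hrall, hPnl, List.takeWhile_cons, List.dropWhile_cons, pvTok, pv_nl_space]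
        · rw [List.takeWhile_append, if_neg hall, List.dropWhile_append]
          have hdw : (r.dropWhile pvP).isEmpty = false := by
            rcases h : r.dropWhile pvP with _ | _
            · exfalso; apply hall
              have h2 := congrArg List.length (List.takeWhile_append_dropWhile (p := pvP) (l := r))
              simp [h] at h2; omega
            · simp
          rw [if_neg (by simp [hdw])]
          have hlen : (r.dropWhile pvP).length ≤ n := by
            have := List.length_dropWhile_le pvP r
            simp at ha; omega
          rw [ih _ hlen b]
          simp

lemma pv_tok_append_nl (a b : List Char) : pvTok (a ++ '\n' :: b) = pvTok a ++ pvTok b :=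
  pv_tok_append_nl_aux a.length a le_rfl b

lemma pv_glue_lines (s : List Char) : pvGlue (pvLines s) = s := by
  induction s with
  | nil => simp [pvLines, pvGlue]
  | cons c r ih =>
    by_cases hc : c = '\n'
    · subst hc
      rcases hr : pvLines r with _ | ⟨h', t⟩
      · exact absurd hr (pvLines_ne_nil r)
      · rw [pvLines]
        simp only [reduceIte, hr]
        rw [pvGlue, ← hr, ih]
        rfl
    · rcases hr : pvLines r with _ | ⟨h', t⟩
      · exact absurd hr (pvLines_ne_nil r)
      · rw [pvLines]
        simp only [hc, if_false, hr]
        cases t with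
        | nil => rw [pvGlue]; rw [hr, pvGlue] at ih; simp [ih]
        | cons y ys =>
          rw [pvGlue]
          rw [hr, pvGlue] at ih
          simp [← ih]

lemma pv_tok_glue (ps : List (List Char)) : pvTok (pvGlue ps) = ps.flatMap pvTok := by
  induction ps with
  | nil => simp [pvGlue, pvTok]
  | cons x xs ih =>
    cases xs with
    | nil => simp [pvGlue]
    | cons y ys =>
      rw [pvGlue, pv_tok_append_nl, ih]
      simp

lemma pv_tok_flatten (s : List Char) : (pvLines s).flatMap pvTok = pvTok s := by
  rw [← pv_tok_glue, pv_glue_lines]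

lemma pv_tok_infix : ∀ {cs p : List Char}, p ∈ pvTok cs → p <:+: cs := by
  intro cs
  induction cs using pvTok.induct with
  | case1 => intro p h; simp [pvTok] at h
  | case2 c r hsp ih =>
    intro p h
    rw [pvTok, if_pos hsp] at h
    exact (ih h).trans (List.suffix_cons c r).isInfix
  | case3 c r hsp ih =>
    intro p h
    rw [pvTok, if_neg hsp] at h
    rcases List.mem_cons.mp h with rfl | h
    · exact (List.cons_prefix_cons.mpr ⟨rfl, List.takeWhile_prefix pvP⟩).isInfix
    · exact (ih h).trans ((List.dropWhile_suffix pvP).trans (List.suffix_cons c r)).isInfix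

lemma pv_foldl_guard_flat (g : String → Bool) (F : String → List String) :
    ∀ (L : List String) (init : List String),
    L.foldl (fun acc line => if g line then acc ++ F line else acc) init
      = init ++ L.flatMap (fun line => if g line then F line else []) := by
  intro L
  induction L with
  | nil => simp
  | cons x xs ih =>
    intro init
    simp only [List.foldl_cons, List.flatMap_cons]
    split_ifs with h <;> simp [ih, h]

-- the per-line guard is redundant: any kept token ends with input_domain, hence contains it
lemma pv_guard_redundant (d line : String) :
    (if PySem.Str.isIn d line then
        (PySem.Str.split₀ line).filter (fun p => p != d && PySem.Str.endswith p d)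
      else [])
    = (PySem.Str.split₀ line).filter (fun p => p != d && PySem.Str.endswith p d) := by
  by_cases hg : PySem.Str.isIn d line = true
  · rw [if_pos hg]
  · rw [if_neg hg]
    symm
    rw [List.filter_eq_nil_iff]
    intro part hmem hpart
    apply hg
    simp only [Bool.and_eq_true] at hpart
    have hsuf : d.toList <:+ part.toList :=
      (PySem.Chars.endswith_iff _ _).mp ((PySem.Str.endswith_eq part d) ▸ hpart.2)
    have hmem' : part.toList ∈ pvTok line.toList := by
      rw [← pv_split0_eq_tok, ← PySem.Str.split₀_map_toList]
      exact List.mem_map_of_mem hmem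
    rw [PySem.Str.isIn_eq]
    exact (PySem.Chars.isIn_iff_infix _ _).mpr (hsuf.isInfix.trans (pv_tok_infix hmem'))

lemma pv_filter_split0 (pr : String → Bool) (s : String) :
    (PySem.Str.split₀ s).filter pr
      = ((pvTok s.toList).filter (fun cs => pr (String.ofList cs))).map String.ofList := by
  rw [PySem.Str.split₀, pv_split0_eq_tok, List.filter_map]
  rfl

lemma pv_main (d out : String) : extract_subdomains d out = extract_subdomains_alt d out := by
  unfold extract_subdomains extract_subdomains_alt
  have hsplit : (PySem.Str.split? out "\n").getD [] = (pvLines out.toList).map String.ofList := by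
    have : ("\n" : String).toList = ['\n'] := rfl
    simp [PySem.Str.split?, PySem.Chars.split?, this, pv_splitOn_eq_lines]
  have hfun : (fun (subdomains : List String) (line : String) =>
      if PySem.Str.isIn d line then
        (PySem.Str.split₀ line).foldl (fun s part =>
          if part != d && PySem.Str.endswith part d then s ++ [part] else s) subdomains
      else subdomains)
      = (fun subdomains line => if PySem.Str.isIn d line then
          subdomains ++ (PySem.Str.split₀ line).filter (fun p => p != d && PySem.Str.endswith p d)
        else subdomains) := by
    funext acc line
    split_ifs with hg
    · simpa using PySem.List.foldl_append_if
        (fun part => part != d && PySem.Str.endswith part d) id (PySem.Str.split₀ line) acc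
    · rfl
  rw [hsplit, hfun, pv_foldl_guard_flat]
  simp only [List.nil_append, pv_guard_redundant]
  simp only [pv_filter_split0, List.flatMap_map, Function.comp_def, String.toList_ofList]
  rw [← List.map_flatMap, ← List.filter_flatMap, pv_tok_flatten]

-- ===== VERDICT (by name: the statement is the Claim_ definition above) =====
theorem extract_subdomains_spec : Claim_equal_extract_subdomains := by
  intro input_domain amass_output _
  unfold Spec_extract_subdomains
  exact pv_main input_domain amass_output
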